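-- pv_equiv track=rewrite | github.com/fabischw/ppp-2023 | Exercises/PaulSeidel/PSeidel_exercises_03.py | is_String_sorted
-- ===== SOURCE A (Python) =====
-- def is_String_sorted(value = "nothing Given"):
--     """Checks if the String, it needs as an argument, is in sorted.
--     The function only works with Strings made out of numbers completely!"""
--     str_value = str(value)  # to use string-operators in the following lines.
--     if str_value.isdigit == False:
--         raise ValueError("Argument has to be a number-filled String!")
--     else:
--         for counter in range(len(str_value)-1):
--             if str_value[counter] > str_value[counter+1]:
--                 return False
--         return True
-- ===== SOURCE B (Python) =====
-- def is_String_sorted(value = "nothing Given"):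
--     str_value = str(value)
--     return str_value == ''.join(sorted(str_value))
-- ===== Notes on version B (the rewrite author's own statement) =====
-- stated objective: simpler
-- what changed: Replaced the index loop over adjacent pairs by building a sorted copy of the string and comparing it to the original for equality (A's isdigit guard compares the method object to False and never fires, so neither version raises).
import Mathlib
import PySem

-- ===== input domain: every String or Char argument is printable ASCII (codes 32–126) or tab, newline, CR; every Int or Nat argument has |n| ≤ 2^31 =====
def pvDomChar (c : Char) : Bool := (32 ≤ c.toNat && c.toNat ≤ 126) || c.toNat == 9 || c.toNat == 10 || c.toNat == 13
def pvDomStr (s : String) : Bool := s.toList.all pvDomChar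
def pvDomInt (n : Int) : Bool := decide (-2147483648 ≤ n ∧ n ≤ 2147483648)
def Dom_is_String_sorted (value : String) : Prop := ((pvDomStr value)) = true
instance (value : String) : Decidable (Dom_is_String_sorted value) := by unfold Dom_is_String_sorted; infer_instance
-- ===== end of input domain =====

-- B replaces A's adjacent-pair index loop by comparing the string with its sorted copy (simpler); A's isdigit guard
-- compares the method object to False, never fires, so neither program raises.

-- ===== PORT A =====
-- the 'for counter in range(len(str_value)-1)' loop with its early 'return False'
def pvLoopA (cs : List Char) : List Int → Bool
  | [] => true
  | i :: rest =>
      if PySem.List.pyGetD cs (i+1) ' ' < PySem.List.pyGetD cs i ' ' then false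
      else pvLoopA cs rest

def is_String_sorted (value : String) : Bool :=
  -- str(value) on a str is the identity; the guard 'str_value.isdigit == False' compares a
  -- bound method object to False, which is always False, so the else branch always runs.
  let cs := value.toList
  pvLoopA cs (PySem.List.pyRange 0 ((cs.length : Int) - 1) 1)

-- ===== PORT B =====
def is_String_sorted_alt (value : String) : Bool :=
  let cs := value.toList
  cs == PySem.List.sorted cs (fun c => c) false

-- ===== PRECONDITION & SPEC =====
def Spec_is_String_sorted (value : String) (out : Bool) : Prop := out = is_String_sorted_alt value
instance (value : String) (out : Bool) : Decidable (Spec_is_String_sorted value out) := by unfold Spec_is_String_sorted; infer_instance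

-- ===== CLAIM (what is proved, stated in full; the proofs are below) =====
def Claim_equal_is_String_sorted : Prop := ∀ (value : String), Dom_is_String_sorted value → Spec_is_String_sorted value (is_String_sorted value)

-- ===== LEMMAS AND PROOFS =====

-- A's loop over range(a, a+n) succeeds iff every visited adjacent pair is non-decreasing
theorem pvLoopA_iff (cs : List Char) (n : Nat) :
    ∀ a : Int, (pvLoopA cs (PySem.List.pyRange a (a + n) 1) = true ↔
      ∀ i : Int, a ≤ i → i < a + n →
        PySem.List.pyGetD cs i ' ' ≤ PySem.List.pyGetD cs (i+1) ' ') := by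
  induction n with
  | zero =>
      intro a
      rw [PySem.List.pyRange_one_eq_nil (by omega)]
      simp [pvLoopA]
      intro i h1 h2; omega
  | succ n ih =>
      intro a
      rw [PySem.List.pyRange_one_cons (by omega : a < a + (n+1 : Nat))]
      show (pvLoopA cs (a :: PySem.List.pyRange (a+1) (a + (n+1 : Nat)) 1) = true) ↔ _
      have hr : PySem.List.pyRange (a+1) (a + (n+1 : Nat)) 1
              = PySem.List.pyRange (a+1) ((a+1) + (n : Nat)) 1 := by
        congr 1; push_cast; ring
      rw [pvLoopA, hr]
      split_ifs with h
      · simp only [false_iff]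
        intro hall
        exact absurd (hall a le_rfl (by omega)) (not_le.mpr h)
      · rw [ih (a+1)]
        constructor
        · intro hall i h1 h2
          rcases eq_or_lt_of_le h1 with rfl | hlt
          · exact not_lt.mp h
          · exact hall i (by omega) (by omega)
        · intro hall i h1 h2
          exact hall i (by omega) (by push_cast at h2 ⊢; omega)

theorem pairA (cs : List Char) :
    pvLoopA cs (PySem.List.pyRange 0 ((cs.length : Int) - 1) 1) = true ↔
      cs.Pairwise (· ≤ ·) := by
  rw [← List.isChain_iff_pairwise]
  cases cs with
  | nil =>
      have h0 : ((([] : List Char).length : Int)) - 1 = -1 := by simp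
      rw [h0, PySem.List.pyRange_one_eq_nil (by norm_num)]
      simp [pvLoopA]
  | cons c cs' =>
      have hlen : (((c :: cs').length : Int)) - 1 = ((cs'.length : Nat) : Int) := by
        simp
      rw [hlen]
      have hmain := pvLoopA_iff (c :: cs') cs'.length 0
      simp only [zero_add] at hmain
      rw [hmain, List.isChain_iff_getElem]
      constructor
      · intro hall k hk
        have h := hall k (by omega) (by simp at hk; omega)
        rw [show ((k : Int) + 1) = ((k + 1 : Nat) : Int) by push_cast; ring] at h
        simp only [PySem.List.pyGetD_natCast] at h
        rwa [List.getD_eq_getElem _ _ (by simp at hk ⊢; omega),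
             List.getD_eq_getElem _ _ (by simpa using hk)] at h
      · intro hall i h1 h2
        obtain ⟨k, rfl⟩ := Int.eq_ofNat_of_zero_le h1
        rw [show ((k : Int) + 1) = ((k + 1 : Nat) : Int) by push_cast; ring]
        simp only [PySem.List.pyGetD_natCast]
        have hk : k + 1 < (c :: cs').length := by
          have : (k : Int) < (cs'.length : Int) := h2
          simp; omega
        rw [List.getD_eq_getElem _ _ (by simp at hk ⊢; omega),
            List.getD_eq_getElem _ _ hk]
        exact hall k hk

theorem pairB (cs : List Char) :
    (cs == PySem.List.sorted cs (fun c => c) false) = true ↔ cs.Pairwise (· ≤ ·) := by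
  rw [beq_iff_eq]
  constructor
  · intro h
    have hp := PySem.List.sorted_pairwise cs (fun c => c) (κ := Char)
    rw [← h] at hp
    exact hp
  · intro h
    exact (PySem.List.sorted_eq_self_of_pairwise cs (fun c => c) (by simpa using h)).symm

-- ===== VERDICT (by name: the statement is the Claim_ definition above) =====
theorem is_String_sorted_spec : Claim_equal_is_String_sorted := by
  intro value _
  unfold Spec_is_String_sorted is_String_sorted is_String_sorted_alt
  by_cases h : value.toList.Pairwise (· ≤ ·)
  · rw [(pairA value.toList).mpr h, (pairB value.toList).mpr h]
  · have ha := (pairA value.toList).not.mpr h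
    have hb := (pairB value.toList).not.mpr h
    simp only [Bool.not_eq_true] at ha hb
    rw [ha, hb]
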